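-- pv_equiv track=rewrite | github.com/paiml/depyler | examples/hard_realworld_template.py | tpl_count_placeholders
-- ===== SOURCE A (Python) =====
-- def tpl_find_open(tpl: str, start: int) -> int:
--     """Find next {{ in template from start position. Returns -1 if not found."""
--     idx: int = start
--     while idx < len(tpl) - 1:
--         if tpl[idx] == "{" and tpl[idx + 1] == "{":
--             return idx
--         idx = idx + 1
--     return -1
--
-- def tpl_find_close(tpl: str, start: int) -> int:
--     """Find next }} in template from start position. Returns -1 if not found."""
--     idx: int = start
--     while idx < len(tpl) - 1:
--         if tpl[idx] == "}" and tpl[idx + 1] == "}":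
--             return idx
--         idx = idx + 1
--     return -1
--
-- def tpl_count_placeholders(tpl: str) -> int:
--     """Count number of {{...}} placeholders."""
--     count: int = 0
--     pos: int = 0
--     while pos < len(tpl):
--         open_pos: int = tpl_find_open(tpl, pos)
--         if open_pos == -1:
--             pos = len(tpl)
--         else:
--             close_pos: int = tpl_find_close(tpl, open_pos + 2)
--             if close_pos == -1:
--                 pos = len(tpl)
--             else:
--                 count = count + 1
--                 pos = close_pos + 2
--     return count
-- ===== SOURCE B (Python) =====
-- def tpl_count_placeholders(tpl: str) -> int:
--     """Count number of {{...}} placeholders."""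
--     count = 0
--     i = 0
--     inside = False
--     n = len(tpl)
--     while i < n - 1:
--         if not inside and tpl[i] == "{" and tpl[i + 1] == "{":
--             inside = True
--             i += 2
--         elif inside and tpl[i] == "}" and tpl[i + 1] == "}":
--             count += 1
--             inside = False
--             i += 2
--         else:
--             i += 1
--     return count
-- ===== Notes on version B (the rewrite author's own statement) =====
-- stated objective: simpler
-- what changed: Replaces A's outer loop that calls two helper scanners (tpl_find_open, tpl_find_close) with a single flat pass over the string holding a boolean state flag, so the three loops collapse into one.
import Mathlib
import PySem

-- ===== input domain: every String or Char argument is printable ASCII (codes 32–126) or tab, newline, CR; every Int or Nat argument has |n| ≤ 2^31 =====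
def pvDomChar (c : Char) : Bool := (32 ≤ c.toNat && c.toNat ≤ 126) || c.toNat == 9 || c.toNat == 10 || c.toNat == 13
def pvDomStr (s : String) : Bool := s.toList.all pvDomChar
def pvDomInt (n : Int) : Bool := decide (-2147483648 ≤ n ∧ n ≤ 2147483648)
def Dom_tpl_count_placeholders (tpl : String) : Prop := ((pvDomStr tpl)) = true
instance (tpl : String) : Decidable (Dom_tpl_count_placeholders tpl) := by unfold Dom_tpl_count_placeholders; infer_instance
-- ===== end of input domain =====

-- B replaces A's nested find_open/find_close rescans by one flat pass with a boolean
-- `inside` state; objective: simpler (one loop instead of three).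

-- ===== PORT A =====
-- tpl_find_open: scan idx while idx < len-1 for "{{"; `none` plays Python's -1.
def tplFindOpen (cs : List Char) (idx : Nat) : Option Nat :=
  if idx + 1 < cs.length then
    if cs.getD idx ' ' = '{' ∧ cs.getD (idx + 1) ' ' = '{' then some idx
    else tplFindOpen cs (idx + 1)
  else none
termination_by cs.length - idx

-- tpl_find_close: scan idx while idx < len-1 for "}}"; `none` plays Python's -1.
def tplFindClose (cs : List Char) (idx : Nat) : Option Nat :=
  if idx + 1 < cs.length then
    if cs.getD idx ' ' = '}' ∧ cs.getD (idx + 1) ' ' = '}' then some idx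
    else tplFindClose cs (idx + 1)
  else none
termination_by cs.length - idx

-- needed by tplLoopA's termination proof
theorem tplFindOpen_ge (cs : List Char) (idx o : Nat)
    (h : tplFindOpen cs idx = some o) : idx ≤ o := by
  fun_induction tplFindOpen cs idx with
  | case1 idx h1 h2 => simp at h; omega
  | case2 idx h1 h2 ih => have := ih h; omega
  | case3 idx h1 => simp at h

theorem tplFindClose_ge (cs : List Char) (idx c : Nat)
    (h : tplFindClose cs idx = some c) : idx ≤ c := by
  fun_induction tplFindClose cs idx with
  | case1 idx h1 h2 => simp at h; omega
  | case2 idx h1 h2 ih => have := ih h; omega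
  | case3 idx h1 => simp at h

-- the main while-loop of A: pos/count state
def tplLoopA (cs : List Char) (pos : Nat) (count : Int) : Int :=
  if _hp : pos < cs.length then
    match ho : tplFindOpen cs pos with
    | none => count
    | some o =>
      match hc : tplFindClose cs (o + 2) with
      | none => count
      | some c => tplLoopA cs (c + 2) (count + 1)
  else count
termination_by cs.length - pos
decreasing_by
  have h1 := tplFindOpen_ge cs pos o ho
  have h2 := tplFindClose_ge cs (o + 2) c hc
  omega

def tpl_count_placeholders (tpl : String) : Int := tplLoopA tpl.toList 0 0

-- ===== PORT B =====
-- one flat pass: `inside` = currently between "{{" and its "}}"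
def tplLoopB (cs : List Char) (i : Nat) (inside : Bool) (count : Int) : Int :=
  if i + 1 < cs.length then
    if inside = false ∧ cs.getD i ' ' = '{' ∧ cs.getD (i + 1) ' ' = '{' then
      tplLoopB cs (i + 2) true count
    else if inside = true ∧ cs.getD i ' ' = '}' ∧ cs.getD (i + 1) ' ' = '}' then
      tplLoopB cs (i + 2) false (count + 1)
    else tplLoopB cs (i + 1) inside count
  else count
termination_by cs.length - i

def tpl_count_placeholders_alt (tpl : String) : Int := tplLoopB tpl.toList 0 false 0

-- ===== PRECONDITION & SPEC =====
def Spec_tpl_count_placeholders (tpl : String) (out : Int) : Prop := out = tpl_count_placeholders_alt tpl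
instance (tpl : String) (out : Int) : Decidable (Spec_tpl_count_placeholders tpl out) := by unfold Spec_tpl_count_placeholders; infer_instance

-- ===== CLAIM (what is proved, stated in full; the proofs are below) =====
def Claim_equal_tpl_count_placeholders : Prop := ∀ (tpl : String), Dom_tpl_count_placeholders tpl → Spec_tpl_count_placeholders tpl (tpl_count_placeholders tpl)

-- ===== LEMMAS AND PROOFS =====

-- B in "looking for {{" mode behaves like one call to tpl_find_open
theorem loopB_false (cs : List Char) (i : Nat) (count : Int) :
    tplLoopB cs i false count =
      (match tplFindOpen cs i with
       | none => count
       | some o => tplLoopB cs (o + 2) true count) := by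
  fun_induction tplFindOpen cs i with
  | case1 i h1 h2 =>
      rw [tplLoopB, if_pos h1, if_pos ⟨rfl, h2⟩]
  | case2 i h1 h2 ih =>
      rw [tplLoopB, if_pos h1, if_neg (by simpa using h2), if_neg (by simp)]
      exact ih
  | case3 i h1 =>
      rw [tplLoopB, if_neg h1]

-- B in "looking for }}" mode behaves like one call to tpl_find_close
theorem loopB_true (cs : List Char) (i : Nat) (count : Int) :
    tplLoopB cs i true count =
      (match tplFindClose cs i with
       | none => count
       | some c => tplLoopB cs (c + 2) false (count + 1)) := by
  fun_induction tplFindClose cs i with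
  | case1 i h1 h2 =>
      rw [tplLoopB, if_pos h1, if_neg (by simp), if_pos ⟨rfl, h2⟩]
  | case2 i h1 h2 ih =>
      rw [tplLoopB, if_pos h1, if_neg (by simp), if_neg (by simpa using h2)]
      exact ih
  | case3 i h1 =>
      rw [tplLoopB, if_neg h1]

theorem loopA_eq_loopB (cs : List Char) (pos : Nat) (count : Int) :
    tplLoopA cs pos count = tplLoopB cs pos false count := by
  fun_induction tplLoopA cs pos count with
  | case1 pos count hp ho =>
      rw [loopB_false, ho]
  | case2 pos count hp o ho hc =>
      rw [loopB_false, ho]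
      show count = tplLoopB cs (o + 2) true count
      rw [loopB_true, hc]
  | case3 pos count hp o ho c hc ih =>
      rw [loopB_false, ho]
      show tplLoopA cs (c + 2) (count + 1) = tplLoopB cs (o + 2) true count
      rw [loopB_true, hc]
      exact ih
  | case4 pos count hp =>
      rw [tplLoopB, if_neg (by omega)]

-- ===== VERDICT (by name: the statement is the Claim_ definition above) =====
theorem tpl_count_placeholders_spec : Claim_equal_tpl_count_placeholders := by
  intro tpl _
  unfold Spec_tpl_count_placeholders tpl_count_placeholders tpl_count_placeholders_alt
  exact loopA_eq_loopB tpl.toList 0 0
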